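-- pv_equiv track=rewrite | github.com/chengx64/CS61A | disc/disc9.py | lgk_pow
-- ===== SOURCE A (Python) =====
-- def lgk_pow(n,k):
--     """Computes n^k.
--
--     >>> lgk_pow(2, 3)
--     8
--     >>> lgk_pow(4, 2)
--     16
--     >>> a = lgk_pow(2, 100000) # make sure you have log time
--     """
--     "*** YOUR CODE HERE ***"
--     if k == 0:
--         return 1
--     elif k % 2 == 0:
--         return lgk_pow(n, k // 2) ** 2
--     else:
--         return n * lgk_pow(n, k - 1)
-- ===== SOURCE B (Python) =====
-- def lgk_pow(n, k):
--     result = 1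
--     base = n
--     while k > 0:
--         if k % 2:
--             result *= base
--         k //= 2
--         if k:
--             base *= base
--     return result
-- ===== Notes on version B (the rewrite author's own statement) =====
-- stated objective: idiomatic
-- what changed: Replaces the recursion (square on even k, multiply on odd k) by an iterative binary-exponentiation loop maintaining result and base while halving k.
import Mathlib
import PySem

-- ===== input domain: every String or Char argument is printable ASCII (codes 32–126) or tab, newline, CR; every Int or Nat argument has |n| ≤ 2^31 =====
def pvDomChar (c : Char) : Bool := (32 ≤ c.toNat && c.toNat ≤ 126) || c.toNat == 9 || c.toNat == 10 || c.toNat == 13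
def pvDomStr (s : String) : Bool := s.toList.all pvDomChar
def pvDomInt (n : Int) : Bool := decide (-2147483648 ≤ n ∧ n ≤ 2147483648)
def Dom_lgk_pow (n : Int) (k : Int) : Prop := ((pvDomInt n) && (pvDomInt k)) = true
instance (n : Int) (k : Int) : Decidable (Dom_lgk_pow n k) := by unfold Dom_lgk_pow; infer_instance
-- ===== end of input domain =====

-- B replaces A's recursion by an iterative binary-exponentiation loop (same multiplication
-- count, constant extra space); equal on all k ≥ 0, the inputs on which A terminates.

-- ===== PORT A =====
-- A's recursion terminates only for k ≥ 0; the fuel k.toNat + 1 suffices there (each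
-- recursive call strictly decreases k.toNat), so the port equals A on all of Pre_.
def lgk_powFuel (n : Int) : Nat → Int → Int
  | 0, _ => 1
  | f + 1, k =>
    if k = 0 then 1
    else if PySem.Int.mod k 2 = 0 then (lgk_powFuel n f (PySem.Int.floordiv k 2)) ^ 2
    else n * lgk_powFuel n f (k - 1)

def lgk_pow (n : Int) (k : Int) : Int := lgk_powFuel n (k.toNat + 1) k

-- ===== PORT B =====
-- the 'while k > 0' loop of Source B; fuel k.toNat + 1 suffices since k //= 2 halves k > 0.
def lgk_powLoop : Nat → Int → Int → Int → Int
  | 0, result, _, _ => result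
  | f + 1, result, base, k =>
    if 0 < k then
      lgk_powLoop f (if PySem.Int.mod k 2 ≠ 0 then result * base else result)
        (if PySem.Int.floordiv k 2 ≠ 0 then base * base else base)
        (PySem.Int.floordiv k 2)
    else result

def lgk_pow_alt (n : Int) (k : Int) : Int := lgk_powLoop (k.toNat + 1) 1 n k

-- ===== PRECONDITION & SPEC =====
-- Pre_ excludes k < 0, on which A recurses forever (RecursionError).
def Pre_lgk_pow (n : Int) (k : Int) : Prop := 0 ≤ k
instance (n : Int) (k : Int) : Decidable (Pre_lgk_pow n k) := by unfold Pre_lgk_pow; infer_instance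
def pvWitness_lgk_pow : Int × Int := (2, 3)

def Spec_lgk_pow (n : Int) (k : Int) (out : Int) : Prop := out = lgk_pow_alt n k
instance (n : Int) (k : Int) (out : Int) : Decidable (Spec_lgk_pow n k out) := by unfold Spec_lgk_pow; infer_instance

-- ===== CLAIM (what is proved, stated in full; the proofs are below) =====
def Claim_equal_lgk_pow : Prop := ∀ (n : Int) (k : Int), Dom_lgk_pow n k → Pre_lgk_pow n k → Spec_lgk_pow n k (lgk_pow n k)

-- ===== LEMMAS AND PROOFS =====

theorem lgk_powFuel_eq_pow (n : Int) :
    ∀ (f : Nat) (k : Int), 0 ≤ k → k.toNat < f → lgk_powFuel n f k = n ^ k.toNat := by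
  intro f
  induction f with
  | zero => intro k _ h; omega
  | succ f ih =>
    intro k hk hf
    by_cases h0 : k = 0
    · simp [lgk_powFuel, h0]
    · rw [lgk_powFuel]
      rw [PySem.Int.mod_eq_emod_of_pos (a := k) (by norm_num),
          PySem.Int.floordiv_eq_ediv_of_pos (a := k) (by norm_num)]
      by_cases he : k % 2 = 0
      · rw [if_neg h0, if_pos he, ih (k / 2) (by omega) (by omega), ← pow_mul]
        congr 1
        omega
      · rw [if_neg h0, if_neg he, ih (k - 1) (by omega) (by omega)]
        rw [← pow_succ']
        congr 1
        omega

theorem lgk_powLoop_eq :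
    ∀ (f : Nat) (result base k : Int), 0 ≤ k → k.toNat < f →
      lgk_powLoop f result base k = result * base ^ k.toNat := by
  intro f
  induction f with
  | zero => intro _ _ k _ h; omega
  | succ f ih =>
    intro result base k hk hf
    by_cases hpos : 0 < k
    · rw [lgk_powLoop, if_pos hpos,
          PySem.Int.mod_eq_emod_of_pos (a := k) (by norm_num),
          PySem.Int.floordiv_eq_ediv_of_pos (a := k) (by norm_num),
          ih _ _ (k / 2) (by omega) (by omega)]
      split_ifs with hodd hz hz
      · rw [show base * base = base ^ 2 by ring, ← pow_mul, mul_assoc, ← pow_succ']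
        congr 2
        omega
      · have hk1 : k = 1 := by omega
        subst hk1
        norm_num
      · rw [show base * base = base ^ 2 by ring, ← pow_mul]
        congr 2
        omega
      · exfalso
        omega
    · have : k = 0 := by omega
      simp [lgk_powLoop, this]

-- ===== VERDICT (by name: the statement is the Claim_ definition above) =====
theorem lgk_pow_spec : Claim_equal_lgk_pow := by
  intro n k _ hk
  unfold Spec_lgk_pow lgk_pow lgk_pow_alt
  rw [lgk_powFuel_eq_pow n _ k hk (by omega),
      lgk_powLoop_eq _ 1 n k hk (by omega), one_mul]
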